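-- pv_equiv track=rewrite | github.com/TianyuTerry/OptimizationProject | recoverPath.py | index_to_time
-- ===== SOURCE A (Python) =====
-- def index_to_time(i):
--     time = [9, 0]
--     while i != 0:
--         i -= 1
--         time[1] += 10
--         if time[1] == 60:
--             time[0] += 1
--             time[1] = 0
--     return time
-- ===== SOURCE B (Python) =====
-- def index_to_time(i):
--     return [9 + i // 6, (i % 6) * 10]
-- ===== Notes on version B (the rewrite author's own statement) =====
-- stated objective: faster
-- what changed: replaced the minute-stepping while loop by a closed-form divmod computation of the hour and minute
import Mathlib
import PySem

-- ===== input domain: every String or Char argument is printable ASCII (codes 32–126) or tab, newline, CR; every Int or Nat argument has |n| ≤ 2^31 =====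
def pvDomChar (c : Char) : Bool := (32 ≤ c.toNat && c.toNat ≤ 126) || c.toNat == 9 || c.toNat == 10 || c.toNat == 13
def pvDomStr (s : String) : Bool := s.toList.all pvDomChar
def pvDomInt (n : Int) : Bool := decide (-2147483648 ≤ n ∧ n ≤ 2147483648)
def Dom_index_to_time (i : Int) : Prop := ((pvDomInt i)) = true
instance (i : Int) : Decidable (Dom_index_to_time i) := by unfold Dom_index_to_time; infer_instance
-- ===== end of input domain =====

-- B replaces A's minute-stepping while loop by closed-form divmod arithmetic (objective: faster, measured).

-- ===== PORT A =====
-- A's while loop runs exactly i times for nonnegative i (and forever otherwise, excluded by Pre_);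
-- ported as structural recursion on the iteration count with the same (hour, minute) state.
def index_to_time_loop : Nat → Int × Int → Int × Int
  | 0, t => t
  | n + 1, (h, m) =>
      let m' := m + 10
      if m' = 60 then index_to_time_loop n (h + 1, 0)
      else index_to_time_loop n (h, m')

def index_to_time (i : Int) : List Int :=
  let t := index_to_time_loop i.toNat (9, 0)
  [t.1, t.2]

-- ===== PORT B =====
def index_to_time_alt (i : Int) : List Int :=
  [9 + PySem.Int.floordiv i 6, PySem.Int.mod i 6 * 10]

-- ===== PRECONDITION & SPEC =====
-- A's while loop never terminates for negative i, so Pre_ excludes negative inputs.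
def Pre_index_to_time (i : Int) : Prop := 0 ≤ i
instance (i : Int) : Decidable (Pre_index_to_time i) := by unfold Pre_index_to_time; infer_instance
def pvWitness_index_to_time : Int := (13)

def Spec_index_to_time (i : Int) (out : List Int) : Prop := out = index_to_time_alt i
instance (i : Int) (out : List Int) : Decidable (Spec_index_to_time i out) := by unfold Spec_index_to_time; infer_instance

-- ===== CLAIM (what is proved, stated in full; the proofs are below) =====
def Claim_equal_index_to_time : Prop := ∀ (i : Int), Dom_index_to_time i → Pre_index_to_time i → Spec_index_to_time i (index_to_time i)

-- ===== LEMMAS AND PROOFS =====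

-- Loop invariant: closed form of the loop state after n steps.
theorem index_to_time_loop_closed (n : Nat) : ∀ (h m : Int), 0 ≤ m → m < 60 → m % 10 = 0 →
    index_to_time_loop n (h, m) = (h + (m + 10 * n) / 60, (m + 10 * n) % 60) := by
  induction n with
  | zero => intro h m h0 h60 h10; simp [index_to_time_loop]; omega
  | succ n ih =>
    intro h m h0 h60 h10
    simp only [index_to_time_loop]
    by_cases hc : m + 10 = 60
    · rw [if_pos hc, ih (h + 1) 0 (by omega) (by omega) (by omega)]
      simp only [Prod.mk.injEq]; omega
    · rw [if_neg hc, ih h (m + 10) (by omega) (by omega) (by omega)]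
      simp only [Prod.mk.injEq]; omega

-- ===== VERDICT (by name: the statement is the Claim_ definition above) =====
theorem index_to_time_spec : Claim_equal_index_to_time := by
  intro i _ hpre
  unfold Spec_index_to_time index_to_time index_to_time_alt
  rw [index_to_time_loop_closed i.toNat 9 0 (by omega) (by omega) (by omega)]
  rw [PySem.Int.floordiv_eq_ediv_of_pos (by omega), PySem.Int.mod_eq_emod_of_pos (by omega)]
  have : (i.toNat : Int) = i := Int.toNat_of_nonneg hpre
  simp only [this]
  simp only [List.cons.injEq, and_true]; omega
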